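-- pv_equiv track=rewrite | github.com/vinchinzu/euler | python/806.py | xor_zero_triples
-- ===== SOURCE A (Python) =====
-- def xor_zero_triples(n):
--     """
--     Enumerate all ordered triples (a,b,c) of nonnegative ints such that:
--         a + b + c = n
--         a xor b xor c = 0
--
--     For even n, solutions can be built bitwise from set bits of n:
--     Each set bit at position p>=1 corresponds to two of (a,b,c) having bit (p-1)=1.
--     There are 3 choices per set bit => 3^{popcount(n)} solutions.
--     """
--     if n & 1:
--         return []
--
--     bits = []
--     x = n
--     p = 0
--     while x:
--         if x & 1:
--             bits.append(p)
--         x >>= 1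
--         p += 1
--
--     # bit 0 must be unset for even n
--     # if it is set, n is odd and we returned already.
--     triples = [(0, 0, 0)]
--     for p in bits:
--         if p == 0:
--             # can't happen for even n
--             continue
--         v = 1 << (p - 1)
--         new_list = []
--         for a, b, c in triples:
--             new_list.append((a + v, b + v, c))
--             new_list.append((a + v, b, c + v))
--             new_list.append((a, b + v, c + v))
--         triples = new_list
--     return triples
-- ===== SOURCE B (Python) =====
-- def xor_zero_triples(n):
--     if n % 2:
--         return []
--     vals = []
--     m = n >> 1
--     p = 0
--     while m:
--         if m & 1:
--             vals.append(1 << p)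
--         m >>= 1
--         p += 1
--     rvals = vals[::-1]
--     out = []
--     for idx in range(3 ** len(vals)):
--         a = b = c = 0
--         for v in rvals:
--             idx, d = divmod(idx, 3)
--             if d == 0:
--                 a += v
--                 b += v
--             elif d == 1:
--                 a += v
--                 c += v
--             else:
--                 b += v
--                 c += v
--         out.append((a, b, c))
--     return out
-- ===== Notes on version B (the rewrite author's own statement) =====
-- stated objective: alternative
-- what changed: B replaces A's repeated list-expansion fold (rebuilding the triple list once per set bit) by direct indexing: it enumerates idx in range(3**popcount) and decodes idx as a base-3 number, one digit per bit, summing the chosen per-bit contributions; Pre_ excludes negative even n, on which A's while-loop over x >>= 1 never terminates.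
import Mathlib
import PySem

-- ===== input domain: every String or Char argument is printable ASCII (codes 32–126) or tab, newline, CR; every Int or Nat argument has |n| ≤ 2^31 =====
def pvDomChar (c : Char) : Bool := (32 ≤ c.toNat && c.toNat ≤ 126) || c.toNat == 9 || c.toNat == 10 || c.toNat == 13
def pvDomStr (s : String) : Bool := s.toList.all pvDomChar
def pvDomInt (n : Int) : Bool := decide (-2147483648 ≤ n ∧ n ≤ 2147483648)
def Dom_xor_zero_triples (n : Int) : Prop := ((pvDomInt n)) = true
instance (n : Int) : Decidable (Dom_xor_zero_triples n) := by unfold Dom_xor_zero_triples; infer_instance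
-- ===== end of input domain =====

-- B enumerates the 3^popcount solutions by decoding a base-3 index instead of A's
-- repeated list expansion; same cost, different structure (objective: alternative).

-- ===== PORT A =====
-- while x: collect positions of set bits (x ≥ 0 on Pre_; Python's x >>= 1 is x / 2 there)
def aBits (x p : Nat) : List Nat :=
  if x = 0 then []
  else (if x % 2 = 1 then [p] else []) ++ aBits (x / 2) (p + 1)
decreasing_by exact Nat.div_lt_self (Nat.pos_of_ne_zero (by assumption)) (by omega)

-- inner 'for a, b, c in triples' loop body of A
def aExpand (v : Int) (acc : List (Int × Int × Int)) (t : Int × Int × Int) :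
    List (Int × Int × Int) :=
  acc ++ [(t.1 + v, t.2.1 + v, t.2.2), (t.1 + v, t.2.1, t.2.2 + v), (t.1, t.2.1 + v, t.2.2 + v)]

def xor_zero_triples (n : Int) : List (Int × Int × Int) :=
  if PySem.Int.mod n 2 ≠ 0 then []
  else
    let bits := aBits n.toNat 0
    bits.foldl (fun triples p =>
      if p = 0 then triples
      else
        let v : Int := 2 ^ (p - 1)
        triples.foldl (aExpand v) []) [(0, 0, 0)]

-- ===== PORT B =====
-- vals: contributions 1 << p for the set bits of n >> 1 (m ≥ 0 on Pre_)
def bVals (m p : Nat) : List Int :=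
  if m = 0 then []
  else (if m % 2 = 1 then [(2 : Int) ^ p] else []) ++ bVals (m / 2) (p + 1)
decreasing_by exact Nat.div_lt_self (Nat.pos_of_ne_zero (by assumption)) (by omega)

-- one step of B's inner 'for v in rvals' loop: state (idx, a, b, c)
def bStep (st : Nat × Int × Int × Int) (v : Int) : Nat × Int × Int × Int :=
  let d := st.1 % 3
  let i := st.1 / 3
  if d = 0 then (i, st.2.1 + v, st.2.2.1 + v, st.2.2.2)
  else if d = 1 then (i, st.2.1 + v, st.2.2.1, st.2.2.2 + v)
  else (i, st.2.1, st.2.2.1 + v, st.2.2.2 + v)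

def xor_zero_triples_alt (n : Int) : List (Int × Int × Int) :=
  if PySem.Int.mod n 2 ≠ 0 then []
  else
    let vals := bVals (PySem.Int.floordiv n 2).toNat 0
    let rvals := vals.reverse
    (List.range (3 ^ vals.length)).map (fun idx => (rvals.foldl bStep (idx, 0, 0, 0)).2)

-- ===== PRECONDITION & SPEC =====
-- Pre_ excludes negative even n: there A's 'while x: x >>= 1' (and B's while loop) never
-- terminates, so A returns no value.
def Pre_xor_zero_triples (n : Int) : Prop := 0 ≤ n ∨ PySem.Int.mod n 2 ≠ 0
instance (n : Int) : Decidable (Pre_xor_zero_triples n) := by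
  unfold Pre_xor_zero_triples; infer_instance
def pvWitness_xor_zero_triples : Int := 12

def Spec_xor_zero_triples (n : Int) (out : List (Int × Int × Int)) : Prop :=
  out = xor_zero_triples_alt n
instance (n : Int) (out : List (Int × Int × Int)) : Decidable (Spec_xor_zero_triples n out) := by
  unfold Spec_xor_zero_triples; infer_instance

-- ===== CLAIM (what is proved, stated in full; the proofs are below) =====
def Claim_equal_xor_zero_triples : Prop :=
  ∀ (n : Int), Dom_xor_zero_triples n → Pre_xor_zero_triples n →
    Spec_xor_zero_triples n (xor_zero_triples n)

-- ===== LEMMAS AND PROOFS =====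

-- every bit position collected starting from p is ≥ p
theorem aBits_ge (x p : Nat) : ∀ q ∈ aBits x p, p ≤ q := by
  induction x using Nat.strong_induction_on generalizing p with
  | _ x ih =>
    intro q hq
    rw [aBits] at hq
    split at hq
    · simp at hq
    · rename_i hx
      simp only [List.mem_append] at hq
      rcases hq with h | h
      · split at h <;> simp at h; omega
      · have := ih (x / 2) (Nat.div_lt_self (Nat.pos_of_ne_zero hx) one_lt_two) (p + 1) q h
        omega

-- bVals collects exactly the halved values 2^(q-1) of A's bit positions q shifted by one
theorem bVals_eq_map (m p : Nat) :
    bVals m p = (aBits m (p + 1)).map (fun q => (2 : Int) ^ (q - 1)) := by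
  induction m using Nat.strong_induction_on generalizing p with
  | _ m ih =>
    rw [bVals, aBits]
    by_cases hm : m = 0
    · simp [hm]
    · simp only [if_neg hm, List.map_append]
      rw [ih (m / 2) (Nat.div_lt_self (Nat.pos_of_ne_zero hm) one_lt_two) (p + 1)]
      congr 1
      split <;> simp

-- drop the unset bit 0 for even x
theorem aBits_even (x : Nat) (hx : x % 2 = 0) : aBits x 0 = aBits (x / 2) 1 := by
  by_cases h0 : x = 0
  · subst h0
    rw [aBits, aBits]
    simp
  · rw [aBits, if_neg h0]
    simp [hx]

-- A's inner loop is a flatMap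
theorem foldl_aExpand (v : Int) (xs : List (Int × Int × Int)) :
    xs.foldl (aExpand v) [] =
      xs.flatMap (fun t =>
        [(t.1 + v, t.2.1 + v, t.2.2), (t.1 + v, t.2.1, t.2.2 + v), (t.1, t.2.1 + v, t.2.2 + v)]) := by
  have gen : ∀ (xs : List (Int × Int × Int)) (acc : List (Int × Int × Int)),
      xs.foldl (aExpand v) acc =
        acc ++ xs.flatMap (fun t =>
          [(t.1 + v, t.2.1 + v, t.2.2), (t.1 + v, t.2.1, t.2.2 + v),
           (t.1, t.2.1 + v, t.2.2 + v)]) := by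
    intro xs
    induction xs with
    | nil => simp
    | cons t xs ih => intro acc; simp [aExpand, ih]
  simpa using gen xs []

-- B's inner fold with shifted accumulators
theorem bFold_shift (rv : List Int) (i : Nat) (a b c : Int) :
    rv.foldl bStep (i, a, b, c) =
      ((rv.foldl bStep (i, 0, 0, 0)).1,
       a + (rv.foldl bStep (i, 0, 0, 0)).2.1,
       b + (rv.foldl bStep (i, 0, 0, 0)).2.2.1,
       c + (rv.foldl bStep (i, 0, 0, 0)).2.2.2) := by
  induction rv generalizing i a b c with
  | nil => simp
  | cons v rv ih =>
    simp only [List.foldl_cons, bStep]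
    split_ifs <;>
      · rw [ih]
        conv_rhs => rw [ih]
        simp only [Prod.mk.injEq]
        exact ⟨trivial, by ring, by ring, by ring⟩

-- base-3 splitting of the index range
theorem range_three_mul (N : Nat) :
    List.range (3 * N) = (List.range N).flatMap (fun q => [3 * q, 3 * q + 1, 3 * q + 2]) := by
  induction N with
  | zero => simp
  | succ N ih =>
    have h : 3 * (N + 1) = 3 * N + 1 + 1 + 1 := by ring
    rw [h, List.range_succ, List.range_succ, List.range_succ, ih, List.range_succ,
      List.flatMap_append]
    simp

-- the core: A's fold over the values equals B's indexed decoding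
theorem core (vals : List Int) :
    vals.foldl (fun triples v => triples.foldl (aExpand v) []) [((0 : Int), (0 : Int), (0 : Int))] =
      (List.range (3 ^ vals.length)).map
        (fun idx => (vals.reverse.foldl bStep (idx, 0, 0, 0)).2) := by
  induction vals using List.reverseRecOn with
  | nil => simp
  | append_singleton vals v ih =>
    rw [List.foldl_append, List.foldl_cons, List.foldl_nil, foldl_aExpand, ih]
    have hlen : 3 ^ (vals ++ [v]).length = 3 * 3 ^ vals.length := by
      rw [List.length_append]
      simp [pow_succ]
      ring
    rw [hlen, range_three_mul, List.map_flatMap, List.flatMap_map]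
    congr 1
    funext q
    have h0 : (3 * q) % 3 = 0 := by omega
    have h0' : (3 * q) / 3 = q := by omega
    have h1 : (3 * q + 1) % 3 = 1 := by omega
    have h1' : (3 * q + 1) / 3 = q := by omega
    have h2 : (3 * q + 2) % 3 = 2 := by omega
    have h2' : (3 * q + 2) / 3 = q := by omega
    have s0 : bStep (3 * q, 0, 0, 0) v = (q, v, v, 0) := by simp [bStep, h0, h0']
    have s1 : bStep (3 * q + 1, 0, 0, 0) v = (q, v, 0, v) := by simp [bStep, h1, h1']
    have s2 : bStep (3 * q + 2, 0, 0, 0) v = (q, 0, v, v) := by simp [bStep, h2, h2']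
    simp only [List.map_cons, List.map_nil, List.reverse_append, List.reverse_cons,
      List.reverse_nil, List.nil_append, List.cons_append, List.foldl_cons,
      s0, s1, s2]
    rw [bFold_shift vals.reverse q v v 0, bFold_shift vals.reverse q v 0 v,
        bFold_shift vals.reverse q 0 v v]
    simp [add_comm]

-- ===== VERDICT (by name: the statement is the Claim_ definition above) =====
theorem xor_zero_triples_spec : Claim_equal_xor_zero_triples := by
  intro n _ hpre
  unfold Spec_xor_zero_triples xor_zero_triples xor_zero_triples_alt
  by_cases h : PySem.Int.mod n 2 = 0
  · have hn : 0 ≤ n := by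
      rcases hpre with h0 | hne
      · exact h0
      · exact absurd h hne
    simp only [ne_eq, h, not_true_eq_false, if_false]
    obtain ⟨m, rfl⟩ : ∃ m : Nat, n = (m : Int) := ⟨n.toNat, (Int.toNat_of_nonneg hn).symm⟩
    have hmod : (m : Int) % 2 = 0 := by
      rwa [PySem.Int.mod_eq_emod_of_pos (by norm_num)] at h
    have hm2 : m % 2 = 0 := by omega
    have hfd : (PySem.Int.floordiv (m : Int) 2).toNat = m / 2 := by
      rw [PySem.Int.floordiv_eq_ediv_of_pos (by norm_num)]
      omega
    simp only [Int.toNat_natCast, hfd]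
    rw [aBits_even m hm2, bVals_eq_map (m / 2) 0]
    have hcore := core ((aBits (m / 2) (0 + 1)).map (fun q => (2 : Int) ^ (q - 1)))
    rw [List.foldl_map] at hcore
    rw [← hcore]
    apply PySem.List.foldl_congr_mem'
    intro p hp acc
    have h1 : 1 ≤ p := aBits_ge (m / 2) (0 + 1) p hp
    simp [show p ≠ 0 by omega]
  · have hm : n % 2 = 1 := by
      have he := PySem.Int.mod_eq_emod_of_pos (a := n) (b := 2) (by norm_num)
      omega
    simp [hm]
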